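-- pv_equiv track=rewrite | github.com/vasumadireddi/b3p | b3p/mesh2ccx.py | format_eset
-- ===== SOURCE A (Python) =====
-- def format_eset(name, eids):
--     out = f"*elset,elset={name}\n"
--     for i in range(len(eids)):
--         out += f"{eids[i]}"
--         out += "\n" if (i % 16 == 15) else ","
--     if out[-1] == ",":
--         out = out[:-1] + "\n"
--     return out
-- ===== SOURCE B (Python) =====
-- def format_eset(name, eids):
--     header = f"*elset,elset={name}\n"
--     lines = [",".join(f"{e}" for e in eids[i:i + 16]) for i in range(0, len(eids), 16)]
--     if lines:
--         return header + "\n".join(lines) + "\n"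
--     return header
-- ===== Notes on version B (the rewrite author's own statement) =====
-- stated objective: simpler
-- what changed: B chunks the ids into groups of 16 and joins each chunk with ',' and the chunks with '\n', instead of A's per-element modulo-16 separator counter followed by a trailing-comma fixup.
import Mathlib
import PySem

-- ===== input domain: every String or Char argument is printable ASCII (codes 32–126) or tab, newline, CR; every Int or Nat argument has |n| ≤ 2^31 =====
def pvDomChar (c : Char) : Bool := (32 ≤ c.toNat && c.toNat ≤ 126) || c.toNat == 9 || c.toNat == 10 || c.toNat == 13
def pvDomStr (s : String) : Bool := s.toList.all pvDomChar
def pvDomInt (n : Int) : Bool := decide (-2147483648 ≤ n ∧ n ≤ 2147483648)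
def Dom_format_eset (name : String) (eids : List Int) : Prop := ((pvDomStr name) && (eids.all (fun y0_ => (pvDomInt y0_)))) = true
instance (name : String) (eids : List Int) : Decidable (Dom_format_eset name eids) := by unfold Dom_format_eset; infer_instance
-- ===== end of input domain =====

-- B replaces A's per-element modulo-16 counter and trailing-comma fixup by chunking the ids
-- into groups of 16 and joining (objective: simpler, same return value on every input).

-- ===== PORT A =====
-- literal port of A: build the header, append str(eids[i]) then '\n' every 16th element else ',',
-- finally replace a trailing ',' by '\n'. Strings are handled as List Char (PySem convention).
def format_eset (name : String) (eids : List Int) : String :=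
  let out : List Char := "*elset,elset=".toList ++ name.toList ++ ['\n']
  let out := (PySem.List.pyRange 0 (eids.length : Int)).foldl
      (fun out i =>
        (out ++ PySem.Int.toChars (PySem.List.pyGetD eids i 0)) ++
          (if PySem.Int.mod i 16 = 15 then ['\n'] else [','])) out
  if PySem.List.pyGet? out (-1) = some ',' then
    String.ofList (PySem.List.slice out none (some (-1)) ++ ['\n'])
  else String.ofList out

-- ===== PORT B =====
-- eids[i:i+16] for i in range(0, len(eids), 16): the successive 16-element chunks
def pvChunks16 (l : List Int) : List (List Int) :=
  if h : l = [] then [] else l.take 16 :: pvChunks16 (l.drop 16)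
  termination_by l.length
  decreasing_by simp [List.length_drop]; exact List.length_pos_iff.mpr h

def format_eset_alt (name : String) (eids : List Int) : String :=
  let header : List Char := "*elset,elset=".toList ++ name.toList ++ ['\n']
  let lines := (pvChunks16 eids).map (fun c => PySem.Chars.join [','] (c.map PySem.Int.toChars))
  if lines.isEmpty then String.ofList header
  else String.ofList (header ++ PySem.Chars.join ['\n'] lines ++ ['\n'])

-- ===== PRECONDITION & SPEC =====
def Spec_format_eset (name : String) (eids : List Int) (out : String) : Prop := out = format_eset_alt name eids
instance (name : String) (eids : List Int) (out : String) : Decidable (Spec_format_eset name eids out) := by unfold Spec_format_eset; infer_instance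

-- ===== CLAIM (what is proved, stated in full; the proofs are below) =====
def Claim_equal_format_eset : Prop := ∀ (name : String) (eids : List Int), Dom_format_eset name eids → Spec_format_eset name eids (format_eset name eids)

-- ===== LEMMAS AND PROOFS =====

-- the body A's loop produces after the header, starting at loop counter j
def pvBody (j : Nat) : List Int → List Char
  | [] => []
  | e :: t => PySem.Int.toChars e ++ (if j % 16 = 15 then ['\n'] else [',']) ++ pvBody (j + 1) t

-- one line of B: a chunk joined with ','
def pvLine (c : List Int) : List Char := PySem.Chars.join [','] (c.map PySem.Int.toChars)

lemma pvBody_cons (j : Nat) (e : Int) (t : List Int) :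
    pvBody j (e :: t) = PySem.Int.toChars e ++ (if j % 16 = 15 then ['\n'] else [',']) ++ pvBody (j + 1) t := rfl

lemma pvBody_mod : ∀ (l : List Int) (j j' : Nat), j % 16 = j' % 16 → pvBody j l = pvBody j' l := by
  intro l
  induction l with
  | nil => intro j j' _; rfl
  | cons e t ih =>
    intro j j' h
    rw [pvBody_cons, pvBody_cons, h, ih (j + 1) (j' + 1) (by omega)]

lemma pvBody_full : ∀ (c rest : List Int) (j : Nat), c.length + j % 16 = 16 →
    pvBody j (c ++ rest) = pvLine c ++ ['\n'] ++ pvBody (j + c.length) rest := by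
  intro c
  induction c with
  | nil => intro rest j h; simp at h; omega
  | cons e c' ih =>
    intro rest j h
    cases c' with
    | nil =>
      have hj : j % 16 = 15 := by simp at h; omega
      rw [List.cons_append, pvBody_cons, if_pos hj]
      simp [pvLine, PySem.Chars.join_singleton]
    | cons e' c'' =>
      have hj : j % 16 ≠ 15 := by simp at h; omega
      have hrec := ih rest (j + 1) (by simp at h ⊢; omega)
      rw [List.cons_append, pvBody_cons, if_neg hj, hrec]
      have hline : pvLine (e :: e' :: c'') = PySem.Int.toChars e ++ [','] ++ pvLine (e' :: c'') := by
        simp [pvLine, PySem.Chars.join_cons_cons]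
      rw [hline]
      have hl : j + 1 + (e' :: c'').length = j + (e :: e' :: c'').length := by simp; omega
      rw [hl]
      simp [List.append_assoc]

lemma pvBody_partial : ∀ (c : List Int) (j : Nat), c ≠ [] → c.length + j % 16 < 16 →
    pvBody j c = pvLine c ++ [','] := by
  intro c
  induction c with
  | nil => intro j h _; exact absurd rfl h
  | cons e c' ih =>
    intro j _ hlt
    cases c' with
    | nil =>
      have hj : j % 16 ≠ 15 := by simp at hlt; omega
      rw [pvBody_cons, if_neg hj]
      simp [pvLine, PySem.Chars.join_singleton, pvBody]
    | cons e' c'' =>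
      have hj : j % 16 ≠ 15 := by simp at hlt; omega
      have hrec := ih (j + 1) (by simp) (by simp at hlt ⊢; omega)
      rw [pvBody_cons, if_neg hj, hrec]
      have hline : pvLine (e :: e' :: c'') = PySem.Int.toChars e ++ [','] ++ pvLine (e' :: c'') := by
        simp [pvLine, PySem.Chars.join_cons_cons]
      rw [hline]
      simp [List.append_assoc]

lemma pvChunks16_nil : pvChunks16 [] = [] := by rw [pvChunks16]; simp

lemma pvChunks16_ne_nil {l : List Int} (h : l ≠ []) :
    pvChunks16 l = l.take 16 :: pvChunks16 (l.drop 16) := by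
  rw [pvChunks16]; simp [h]

-- A's body equals B's lines joined by '\n', with the chunk-parity tail character
lemma pvBody_eq_join : ∀ (n : Nat) (l : List Int), l.length ≤ n → l ≠ [] →
    pvBody 0 l = PySem.Chars.join ['\n'] ((pvChunks16 l).map pvLine) ++
      (if l.length % 16 = 0 then ['\n'] else [',']) := by
  intro n
  induction n with
  | zero =>
    intro l hn hne
    cases l with
    | nil => exact absurd rfl hne
    | cons e t => simp at hn
  | succ n ih =>
    intro l hn hne
    rw [pvChunks16_ne_nil hne]
    by_cases hd : l.drop 16 = []
    · have hlen : l.length ≤ 16 := by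
        have := List.length_drop (l := l) (i := 16); rw [hd] at this; simp at this; omega
      have htake : l.take 16 = l := List.take_of_length_le hlen
      rw [hd, htake, pvChunks16_nil]
      simp only [List.map_cons, List.map_nil, PySem.Chars.join_singleton]
      by_cases h16 : l.length = 16
      · have := pvBody_full l [] 0 (by simp [h16])
        simp [List.append_nil] at this
        rw [this, if_pos (by omega)]
        simp [pvBody]
      · have hlt : l.length < 16 := by omega
        have hne0 : l.length ≠ 0 := by simpa using hne
        rw [pvBody_partial l 0 hne (by simpa using hlt), if_neg (by omega)]
    · have hlen : 16 < l.length := by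
        by_contra hc
        exact hd (List.drop_eq_nil_of_le (by omega))
      have hsplit : l = l.take 16 ++ l.drop 16 := (List.take_append_drop 16 l).symm
      have htlen : (l.take 16).length = 16 := by simp; omega
      have hfull := pvBody_full (l.take 16) (l.drop 16) 0 (by simp [htlen])
      rw [htlen] at hfull
      have hmod : pvBody (0 + 16) (l.drop 16) = pvBody 0 (l.drop 16) := pvBody_mod _ _ _ (by omega)
      have hih := ih (l.drop 16) (by simp; omega) hd
      calc pvBody 0 l = pvBody 0 (l.take 16 ++ l.drop 16) := by rw [← hsplit]
        _ = pvLine (l.take 16) ++ ['\n'] ++ pvBody 0 (l.drop 16) := by rw [hfull, hmod]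
        _ = _ := by
            rw [hih, List.map_cons, pvChunks16_ne_nil hd, List.map_cons,
              PySem.Chars.join_cons_cons]
            have hm : (l.drop 16).length % 16 = l.length % 16 := by simp; omega
            rw [hm]
            simp [List.append_assoc]

lemma pvPyGet_last {ys : List Char} {c : Char} : PySem.List.pyGet? (ys ++ [c]) (-1) = some c := by
  simp [PySem.List.pyGet?, PySem.List.pyIdx?]

-- A's indexed loop over range(len(eids)) flattens to pvBody
lemma pvFlat_body : ∀ (eids : List Int) (k j : Nat), j + k = eids.length →
    (PySem.List.pyRange (j : Int) (eids.length : Int)).flatMap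
      (fun i => PySem.Int.toChars (PySem.List.pyGetD eids i 0) ++
        (if PySem.Int.mod i 16 = 15 then ['\n'] else [','])) = pvBody j (eids.drop j) := by
  intro eids k
  induction k with
  | zero =>
    intro j h
    have h1 : PySem.List.pyRange (j : Int) (eids.length : Int) = [] := by
      have : (j : Int) = (eids.length : Int) := by omega
      rw [this]
      simp [PySem.List.pyRange]
    rw [h1, List.drop_eq_nil_of_le (by omega)]
    rfl
  | succ k ih =>
    intro j h
    have hj : j < eids.length := by omega
    rw [PySem.List.pyRange_one_cons (by exact_mod_cast hj)]
    rw [List.flatMap_cons]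
    have hcast : (j : Int) + 1 = ((j + 1 : Nat) : Int) := by push_cast; ring
    rw [hcast, ih (j + 1) (by omega)]
    have hget : PySem.List.pyGetD eids (j : Int) 0 = eids[j] := by
      rw [PySem.List.pyGetD_natCast, List.getD_eq_getElem eids 0 hj]
    have hmod : PySem.Int.mod (j : Int) 16 = ((j % 16 : Nat) : Int) := by
      exact_mod_cast PySem.Int.mod_natCast j 16
    have hdrop : eids.drop j = eids[j] :: eids.drop (j + 1) := List.drop_eq_getElem_cons hj
    rw [hdrop]
    simp only [pvBody, hget, hmod]
    have hiff : (((j % 16 : Nat) : Int) = 15) ↔ j % 16 = 15 := by omega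
    simp only [hiff]

-- both programs as header ++ body, assembled
lemma pvMain : ∀ (name : String) (eids : List Int),
    format_eset name eids = format_eset_alt name eids := by
  intro name eids
  unfold format_eset format_eset_alt
  dsimp only
  set H : List Char := "*elset,elset=".toList ++ name.toList ++ ['\n'] with hH
  have hfold : (PySem.List.pyRange 0 (eids.length : Int)).foldl
      (fun out i =>
        (out ++ PySem.Int.toChars (PySem.List.pyGetD eids i 0)) ++
          (if PySem.Int.mod i 16 = 15 then ['\n'] else [','])) H = H ++ pvBody 0 eids := by
    have hcg := PySem.List.foldl_congr_mem
      (l := PySem.List.pyRange 0 (eids.length : Int)) (init := H)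
      (f := fun out i =>
        (out ++ PySem.Int.toChars (PySem.List.pyGetD eids i 0)) ++
          (if PySem.Int.mod i 16 = 15 then ['\n'] else [',']))
      (g := fun out i =>
        out ++ (PySem.Int.toChars (PySem.List.pyGetD eids i 0) ++
          (if PySem.Int.mod i 16 = 15 then ['\n'] else [','])))
      (by intro acc x _; simp [List.append_assoc])
    rw [hcg, PySem.List.foldl_append_eq_flatMap]
    have := pvFlat_body eids eids.length 0 (by omega)
    simp only [Nat.cast_zero] at this
    rw [this, List.drop_zero]
  rw [hfold]
  by_cases hne : eids = []
  · subst hne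
    have : pvBody 0 ([] : List Int) = [] := rfl
    rw [this, List.append_nil]
    have hH' : H = ("*elset,elset=".toList ++ name.toList) ++ ['\n'] := by simp [hH, List.append_assoc]
    rw [pvChunks16]
    simp only [if_pos rfl, List.map_nil, List.isEmpty_nil, if_pos rfl]
    rw [hH', pvPyGet_last]
    simp
  · have hbody := pvBody_eq_join eids.length eids le_rfl hne
    set J : List Char := PySem.Chars.join ['\n'] ((pvChunks16 eids).map pvLine) with hJ
    have hlines : (pvChunks16 eids).map (fun c => PySem.Chars.join [','] (c.map PySem.Int.toChars)) =
        (pvChunks16 eids).map pvLine := by simp [pvLine]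
    have hchne : pvChunks16 eids ≠ [] := by rw [pvChunks16_ne_nil hne]; simp
    rw [hlines]
    have hempty : ((pvChunks16 eids).map pvLine).isEmpty = false := by
      simp [List.isEmpty_iff, hchne]
    rw [hempty]
    simp only [Bool.false_eq_true, if_neg (by simp : ¬ (false = true))]
    by_cases hmod : eids.length % 16 = 0
    · rw [hbody, if_pos hmod]
      have hassoc : H ++ (J ++ ['\n']) = (H ++ J) ++ ['\n'] := by simp [List.append_assoc]
      rw [hassoc, pvPyGet_last]
      simp [hJ, List.append_assoc]
    · rw [hbody, if_neg hmod]
      have hassoc : H ++ (J ++ [',']) = (H ++ J) ++ [','] := by simp [List.append_assoc]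
      rw [hassoc, pvPyGet_last]
      simp only [if_pos rfl, PySem.List.slice_to_neg_one, List.dropLast_concat]
      simp [hJ, List.append_assoc]

-- ===== VERDICT (by name: the statement is the Claim_ definition above) =====
theorem format_eset_spec : Claim_equal_format_eset := by
  intro name eids _
  unfold Spec_format_eset
  exact pvMain name eids
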